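-- pv_equiv track=rewrite | github.com/nihilistkitten/qwixx | src/qwixx.py | _row_to_str
-- ===== SOURCE A (Python) =====
-- from typing import Callable, List, Optional, Tuple
--
-- def _row_to_str(row: List[bool]) -> str:
--     ret = ""
--     have_hit_x = False  # while iterating backwards
--     for is_crossed in row[::-1]:
--         if is_crossed:
--             ret += "X"
--             have_hit_x = True
--         elif have_hit_x:
--             ret += "-"
--         else:
--             ret += " "
--
--         ret += "  "
--
--     return ret[::-1]
-- ===== SOURCE B (Python) =====
-- # B: forward two-pass render — record the index of the last True, then emit
-- # 3-char tokens: cells up to it become '  X'/'  -', the untouched tail is blanks.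
-- from typing import List
--
--
-- def _row_to_str(row: List[bool]) -> str:
--     last = -1
--     for i, c in enumerate(row):
--         if c:
--             last = i
--     out = ["  X" if c else "  -" for c in row[: last + 1]]
--     out.extend(["   "] * (len(row) - last - 1))
--     return "".join(out)
-- ===== Notes on version B (the rewrite author's own statement) =====
-- stated objective: alternative
-- what changed: Replaces A's backward scan with a have_hit_x flag, per-cell string concatenation and a final string reversal by a forward two-pass render: one pass records the index of the last True, then the row is split there and rendered as ' X'/' -' tokens up to it plus a block of blank tokens, joined once.
import Mathlib
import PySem

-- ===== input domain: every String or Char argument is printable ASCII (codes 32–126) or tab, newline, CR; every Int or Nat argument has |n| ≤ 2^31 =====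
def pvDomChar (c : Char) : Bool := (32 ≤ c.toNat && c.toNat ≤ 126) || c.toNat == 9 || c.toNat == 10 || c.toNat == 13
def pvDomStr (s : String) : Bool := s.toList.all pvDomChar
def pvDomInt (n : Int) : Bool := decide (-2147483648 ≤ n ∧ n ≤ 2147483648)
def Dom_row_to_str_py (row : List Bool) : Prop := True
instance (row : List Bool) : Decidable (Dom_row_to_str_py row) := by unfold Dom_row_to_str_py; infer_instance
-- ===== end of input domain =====

-- B replaces A's backward scan with a running flag and a final string reversal by a
-- forward two-pass render (find the last crossed index, then emit 3-char tokens); objective: alternative.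


-- ===== PORT A =====
-- literal port of A: iterate over row[::-1] (a step -1 slice is reverse,
-- PySem.List.slice?_none_none_neg_one) carrying (ret, have_hit_x); finally ret[::-1]
-- (PySem.Str.slice?_none_none_neg_one: reverse of the char list).
def row_to_str_py (row : List Bool) : String :=
  let st := row.reverse.foldl
    (fun (st : String × Bool) is_crossed =>
      let ret := st.1
      let have_hit_x := st.2
      let (ret, have_hit_x) :=
        if is_crossed then (ret ++ "X", true)
        else if have_hit_x then (ret ++ "-", have_hit_x)
        else (ret ++ " ", have_hit_x)
      (ret ++ "  ", have_hit_x))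
    ("", false)
  String.ofList st.1.toList.reverse

-- ===== PORT B =====
-- literal port of Source B: `last` by a forward enumerate loop; row[:last+1] is
-- take (last+1).toNat (exact: last ≥ -1 so last+1 ≥ 0, PySem.List.slice_to);
-- ['   '] * (len(row)-last-1) is replicate (exact: the count is ≥ 0 since last < len).
def row_to_str_py_alt (row : List Bool) : String :=
  let last : Int := row.zipIdx.foldl (fun last ci => if ci.1 then (ci.2 : Int) else last) (-1)
  let out := (row.take (last + 1).toNat).map (fun c => if c then "  X" else "  -")
  let out := out ++ List.replicate (((row.length : Int) - last - 1).toNat) "   "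
  PySem.Str.join "" out

-- ===== PRECONDITION & SPEC =====
def Spec_row_to_str_py (row : List Bool) (out : String) : Prop := out = row_to_str_py_alt row
instance (row : List Bool) (out : String) : Decidable (Spec_row_to_str_py row out) := by unfold Spec_row_to_str_py; infer_instance

-- ===== CLAIM (what is proved, stated in full; the proofs are below) =====
def Claim_equal_row_to_str_py : Prop := ∀ (row : List Bool), Dom_row_to_str_py row → Spec_row_to_str_py row (row_to_str_py row)

-- ===== LEMMAS AND PROOFS =====

-- the character A writes for a cell, given whether a True was already seen behind it
def pvCharOf (c hit : Bool) : Char := if c then 'X' else if hit then '-' else ' '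

-- A's loop, at the level of char lists, processing left to right (so: row reversed)
def pvChunk : List Bool → Bool → List Char
  | [], _ => []
  | c :: t, hit => pvCharOf c hit :: ' ' :: ' ' :: pvChunk t (hit || c)

-- the common forward rendering: each cell gets "  " ++ its char, where
-- the char sees whether any later cell is True (plus an ambient flag)
def pvFwd : List Bool → Bool → List Char
  | [], _ => []
  | c :: t, hit => ' ' :: ' ' :: pvCharOf c (hit || t.any id) :: pvFwd t hit

-- ---- A-side ----

theorem pvA_foldl (l : List Bool) (s : String) (hit : Bool) :
    (l.foldl
      (fun (st : String × Bool) is_crossed =>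
        let ret := st.1
        let have_hit_x := st.2
        let (ret, have_hit_x) :=
          if is_crossed then (ret ++ "X", true)
          else if have_hit_x then (ret ++ "-", have_hit_x)
          else (ret ++ " ", have_hit_x)
        (ret ++ "  ", have_hit_x))
      (s, hit)).1.toList = s.toList ++ pvChunk l hit := by
  induction l generalizing s hit with
  | nil => simp [pvChunk]
  | cons c t ih =>
    cases c <;> cases hit <;>
      simp [pvChunk, pvCharOf, ih, List.foldl_cons]

theorem pvChunk_append (xs ys : List Bool) (hit : Bool) :
    pvChunk (xs ++ ys) hit = pvChunk xs hit ++ pvChunk ys (hit || xs.any id) := by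
  induction xs generalizing hit with
  | nil => simp [pvChunk]
  | cons c t ih =>
    have hb : ∀ h : Bool, ((h || c) || t.any id) = (h || (c :: t).any id) := by
      intro h; cases h <;> cases c <;> simp
    simp [pvChunk, ih, hb]

theorem pvChunk_reverse (l : List Bool) (hit : Bool) :
    (pvChunk l.reverse hit).reverse = pvFwd l hit := by
  induction l generalizing hit with
  | nil => simp [pvChunk, pvFwd]
  | cons c t ih =>
    have : (c :: t).reverse = t.reverse ++ [c] := by simp
    rw [this, pvChunk_append]
    simp [pvChunk, pvFwd, ih, List.any_reverse]

theorem pvA_eq (row : List Bool) : (row_to_str_py row).toList = pvFwd row false := by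
  unfold row_to_str_py
  simp only [pvA_foldl row.reverse "" false]
  simpa using pvChunk_reverse row false

-- ---- B-side ----

def pvLast (row : List Bool) : Int :=
  row.zipIdx.foldl (fun last ci => if ci.1 then (ci.2 : Int) else last) (-1)

theorem pvLast_append_single (xs : List Bool) (c : Bool) :
    pvLast (xs ++ [c]) = if c then (xs.length : Int) else pvLast xs := by
  unfold pvLast
  rw [List.zipIdx_append, List.foldl_append]
  simp

theorem pvLast_spec (row : List Bool) :
    -1 ≤ pvLast row ∧ pvLast row < row.length ∧
    (∀ c ∈ row.drop (pvLast row + 1).toNat, c = false) ∧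
    (0 ≤ pvLast row → (row.take (pvLast row + 1).toNat).getLast? = some true) := by
  induction row using List.reverseRecOn with
  | nil => simp [pvLast]
  | append_singleton xs c ih =>
    obtain ⟨h1, h2, h3, h4⟩ := ih
    rw [pvLast_append_single]
    cases c with
    | true =>
      simp only [if_true]
      refine ⟨by omega, by simp, ?_, ?_⟩
      · intro c hc
        have : ((xs.length : Int) + 1).toNat = xs.length + 1 := by omega
        simp [this] at hc
      · intro _
        have : ((xs.length : Int) + 1).toNat = xs.length + 1 := by omega
        rw [this, List.take_of_length_le (by simp)]
        simp
    | false =>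
      simp only [if_false, Bool.false_eq_true]
      have hle : (pvLast xs + 1).toNat ≤ xs.length := by omega
      refine ⟨h1, by simp; omega, ?_, ?_⟩
      · intro d hd
        rw [List.drop_append_of_le_length hle] at hd
        rcases List.mem_append.mp hd with h | h
        · exact h3 d h
        · simpa using h
      · intro h0
        rw [List.take_append_of_le_length hle]
        exact h4 h0

theorem pvFwd_append (xs ys : List Bool) (hit : Bool) :
    pvFwd (xs ++ ys) hit = pvFwd xs (hit || ys.any id) ++ pvFwd ys hit := by
  induction xs generalizing hit with
  | nil => simp [pvFwd]
  | cons c t ih =>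
    simp only [List.cons_append, pvFwd, ih, List.any_append]
    congr 3
    congr 1
    cases hit <;> cases t.any id <;> cases ys.any id <;> rfl

theorem pvFwd_all_false (ys : List Bool) (h : ∀ c ∈ ys, c = false) :
    pvFwd ys false = (List.replicate ys.length [' ', ' ', ' ']).flatten := by
  induction ys with
  | nil => rfl
  | cons c t ih =>
    have hc : c = false := h c (by simp)
    have ht : t.any id = false := by
      simp only [List.any_eq_false]
      intro x hx; simp [h x (List.mem_cons_of_mem _ hx), id]
    subst hc
    simp [pvFwd, pvCharOf, ht, ih (fun x hx => h x (List.mem_cons_of_mem _ hx)),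
      List.replicate_succ]

theorem pvAny_of_getLast (t : List Bool) (h : t.getLast? = some true) : t.any id = true := by
  simp only [List.any_eq_true]
  exact ⟨true, List.mem_of_getLast? h, rfl⟩

theorem pvFwd_marked (xs : List Bool) (h : xs.getLast? = some true) :
    pvFwd xs false = (xs.map (fun c => if c then [' ', ' ', 'X'] else [' ', ' ', '-'])).flatten := by
  induction xs with
  | nil => simp at h
  | cons c t ih =>
    cases t with
    | nil =>
      simp only [List.getLast?_singleton, Option.some.injEq] at h
      subst h
      rfl
    | cons d u =>
      have ht : (d :: u).getLast? = some true := by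
        rw [List.getLast?_cons_cons] at h; exact h
      have hany : (d :: u).any id = true := pvAny_of_getLast _ ht
      rw [List.map_cons, List.flatten_cons, ← ih ht]
      show ' ' :: ' ' :: pvCharOf c (false || (d :: u).any id) :: pvFwd (d :: u) false = _
      rw [hany]
      cases c <;> simp [pvCharOf]

theorem pvJoin_empty (parts : List (List Char)) :
    PySem.Chars.join [] parts = parts.flatten := by
  induction parts with
  | nil => simp [PySem.Chars.join_nil]
  | cons a r ih =>
    cases r with
    | nil => simp [PySem.Chars.join_singleton]
    | cons b s => rw [PySem.Chars.join_cons_cons, ih]; simp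

theorem pvB_eq (row : List Bool) : (row_to_str_py_alt row).toList = pvFwd row false := by
  obtain ⟨h1, h2, h3, h4⟩ := pvLast_spec row
  have hB : row_to_str_py_alt row = PySem.Str.join ""
      (((row.take (pvLast row + 1).toNat).map (fun c => if c then "  X" else "  -")) ++
        List.replicate (((row.length : Int) - pvLast row - 1)).toNat "   ") := rfl
  rw [hB]
  simp only [PySem.Str.toList_join, List.map_append, List.map_map, List.map_replicate]
  have hnil : ("" : String).toList = [] := rfl
  rw [hnil, pvJoin_empty]
  have hsplit : row = row.take (pvLast row + 1).toNat ++ row.drop (pvLast row + 1).toNat :=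
    (List.take_append_drop _ row).symm
  have hdropany : (row.drop (pvLast row + 1).toNat).any id = false := by
    simp only [List.any_eq_false]
    intro x hx; simp [h3 x hx, id]
  conv_rhs => rw [hsplit]
  rw [pvFwd_append, hdropany, Bool.or_false,
    pvFwd_all_false _ h3]
  have hcount : (((row.length : Int) - pvLast row - 1)).toNat
      = (row.drop (pvLast row + 1).toNat).length := by
    simp [List.length_drop]; omega
  rw [hcount, List.flatten_append]
  congr 1
  · -- head part
    by_cases h0 : 0 ≤ pvLast row
    · rw [pvFwd_marked _ (h4 h0)]
      congr 1
      apply List.map_congr_left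
      intro c _
      cases c <;> rfl
    · have : (pvLast row + 1).toNat = 0 := by omega
      simp [this, pvFwd]

-- ===== VERDICT (by name: the statement is the Claim_ definition above) =====
theorem row_to_str_py_spec : Claim_equal_row_to_str_py := by
  intro row _
  unfold Spec_row_to_str_py
  apply String.ext
  rw [pvA_eq, pvB_eq]
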